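-- pv_equiv track=rewrite | github.com/illusionary-ux/College_Work | Python/Final/6-10.py | count_fibonacci
-- ===== SOURCE A (Python) =====
-- def get_fibonacci(n):
--     if n == 0 or n == 1:
--         return n
--     else:
--         return get_fibonacci(n-1)+get_fibonacci(n-2)
--
-- def count_fibonacci(m, n):
--     cnt = 0
--     i = 0
--     while get_fibonacci(i) <= m:
--         i += 1
--     while get_fibonacci(i) < n:
--         cnt += 1
--         i+=1
--     return cnt
-- ===== SOURCE B (Python) =====
-- def count_fibonacci(m, n):
--     # Single pass over the Fibonacci sequence kept as a running pair (a, b),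
--     # counting terms strictly between m and n; no recursion, no two-phase scan.
--     cnt = 0
--     a, b = 0, 1
--     while a < n:
--         if a > m:
--             cnt += 1
--         a, b = b, a + b
--     return cnt
-- ===== Notes on version B (the rewrite author's own statement) =====
-- stated objective: faster
-- what changed: Replaced the per-index exponential recursive Fibonacci evaluation and the two separate while-loops with a single pass that maintains the running Fibonacci pair (a,b) and counts terms with m < a < n.
import Mathlib
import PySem

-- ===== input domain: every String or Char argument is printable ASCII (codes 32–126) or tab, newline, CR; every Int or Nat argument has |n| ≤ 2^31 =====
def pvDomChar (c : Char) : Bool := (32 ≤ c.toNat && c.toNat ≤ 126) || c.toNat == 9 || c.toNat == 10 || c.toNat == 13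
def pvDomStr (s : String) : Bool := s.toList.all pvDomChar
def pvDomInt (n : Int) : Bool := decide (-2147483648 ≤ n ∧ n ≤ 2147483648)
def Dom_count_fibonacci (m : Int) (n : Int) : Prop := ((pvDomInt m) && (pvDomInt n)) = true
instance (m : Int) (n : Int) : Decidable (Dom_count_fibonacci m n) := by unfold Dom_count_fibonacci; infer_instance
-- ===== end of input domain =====

-- B replaces A's exponential recursive Fibonacci evaluation inside two scanning loops by a
-- single pass maintaining the running Fibonacci pair (objective: faster, asymptotic).

-- ===== PORT A =====
-- get_fibonacci, called by A only on the nonnegative loop counter i (a Nat).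
def fibA : Nat → Int
  | 0 => 0
  | 1 => 1
  | k + 2 => fibA (k + 1) + fibA k

-- A's first while-loop: advance i while get_fibonacci(i) <= m.
-- Fuel only makes the loop total; on Dom 200 steps always suffice (proved below).
def loopA1 (m : Int) : Nat → Nat → Nat
  | 0, i => i
  | f + 1, i => if fibA i ≤ m then loopA1 m f (i + 1) else i

-- A's second while-loop: count while get_fibonacci(i) < n.
def loopA2 (n : Int) : Nat → Nat → Int → Int
  | 0, _, cnt => cnt
  | f + 1, i, cnt => if fibA i < n then loopA2 n f (i + 1) (cnt + 1) else cnt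

def count_fibonacci (m : Int) (n : Int) : Int :=
  loopA2 n 200 (loopA1 m 200 0) 0

-- ===== PORT B =====
-- B's single while-loop over the running pair (a, b).
def loopB (m n : Int) : Nat → Int → Int → Int → Int
  | 0, _, _, cnt => cnt
  | f + 1, a, b, cnt =>
      if a < n then loopB m n f b (a + b) (if m < a then cnt + 1 else cnt) else cnt

def count_fibonacci_alt (m : Int) (n : Int) : Int :=
  loopB m n 200 0 1 0

-- ===== PRECONDITION & SPEC =====
def Spec_count_fibonacci (m : Int) (n : Int) (out : Int) : Prop := out = count_fibonacci_alt m n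
instance (m : Int) (n : Int) (out : Int) : Decidable (Spec_count_fibonacci m n out) := by unfold Spec_count_fibonacci; infer_instance

-- ===== CLAIM (what is proved, stated in full; the proofs are below) =====
def Claim_equal_count_fibonacci : Prop := ∀ (m : Int) (n : Int), Dom_count_fibonacci m n → Spec_count_fibonacci m n (count_fibonacci m n)

-- ===== LEMMAS AND PROOFS =====

-- number of indices j in [i, i+f) with m < fibA j < n
def Fc (m n : Int) : Nat → Nat → Int
  | _, 0 => 0
  | i, f + 1 => (if m < fibA i ∧ fibA i < n then 1 else 0) + Fc m n (i + 1) f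

lemma fibA_nonneg : ∀ i, 0 ≤ fibA i := by
  intro i
  induction i using Nat.strong_induction_on with
  | _ i ih =>
    match i with
    | 0 => simp [fibA]
    | 1 => simp [fibA]
    | k + 2 =>
      have h1 := ih (k + 1) (by omega)
      have h2 := ih k (by omega)
      simp only [fibA]; omega

lemma fibA_step (i : Nat) : fibA i ≤ fibA (i + 1) := by
  match i with
  | 0 => simp [fibA]
  | k + 1 =>
    have := fibA_nonneg k
    simp only [fibA]; omega

lemma fibA_mono {i j : Nat} (h : i ≤ j) : fibA i ≤ fibA j := by
  induction j with
  | zero =>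
    have : i = 0 := by omega
    simp [this]
  | succ k ih =>
    rcases Nat.lt_or_ge i (k + 1) with h1 | h1
    · exact le_trans (ih (by omega)) (fibA_step k)
    · have : i = k + 1 := by omega
      simp [this]

lemma fibA_growth : ∀ k : Nat, (2 : Int) ^ k ≤ fibA (2 * k + 2) := by
  intro k
  induction k with
  | zero => simp [fibA]
  | succ k ih =>
    have hidx : 2 * (k + 1) + 2 = (2 * k + 2) + 2 := by ring
    have hm : fibA (2 * k + 2) ≤ fibA (2 * k + 2 + 1) := fibA_step _
    have hunf : fibA ((2 * k + 2) + 2) = fibA (2 * k + 2 + 1) + fibA (2 * k + 2) := rfl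
    have hp : (2 : Int) ^ (k + 1) = 2 ^ k + 2 ^ k := by ring
    rw [hidx, hunf]
    omega

lemma fibA_big {x : Int} (hx : x ≤ 2147483648) {j : Nat} (hj : 66 ≤ j) : x < fibA j := by
  have h1 : (2 : Int) ^ 32 ≤ fibA 66 := fibA_growth 32
  have h2 : fibA 66 ≤ fibA j := fibA_mono hj
  have : (2147483648 : Int) < 2 ^ 32 := by norm_num
  omega

lemma loopA1_le (m : Int) : ∀ f i, loopA1 m f i ≤ i + f := by
  intro f
  induction f with
  | zero => intro i; simp [loopA1]
  | succ f ih =>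
    intro i
    simp only [loopA1]
    split
    · have := ih (i + 1); omega
    · omega

lemma loopA1_below (m : Int) : ∀ f i j, i ≤ j → j < loopA1 m f i → fibA j ≤ m := by
  intro f
  induction f with
  | zero => intro i j h1 h2; simp [loopA1] at h2; omega
  | succ f ih =>
    intro i j h1 h2
    simp only [loopA1] at h2
    split at h2
    · rcases Nat.eq_or_lt_of_le h1 with h | h
      · subst h; assumption
      · exact ih (i + 1) j (by omega) h2
    · omega

lemma loopA1_gt (m : Int) : ∀ f i, m < fibA (i + f) → m < fibA (loopA1 m f i) := by
  intro f
  induction f with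
  | zero => intro i h; simpa [loopA1] using h
  | succ f ih =>
    intro i h
    simp only [loopA1]
    split
    · apply ih (i + 1)
      have e : i + 1 + f = i + (f + 1) := by omega
      rw [e]; exact h
    · omega

lemma Fc_zero_of_ge (m n : Int) : ∀ f i, n ≤ fibA i → Fc m n i f = 0 := by
  intro f
  induction f with
  | zero => intro i _; simp [Fc]
  | succ f ih =>
    intro i h
    have h2 : n ≤ fibA (i + 1) := le_trans h (fibA_step i)
    simp only [Fc, ih (i + 1) h2]
    have : ¬ (m < fibA i ∧ fibA i < n) := by omega
    simp [this]

lemma Fc_zero_of_le (m n : Int) : ∀ f i, (∀ j, i ≤ j → j < i + f → fibA j ≤ m) → Fc m n i f = 0 := by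
  intro f
  induction f with
  | zero => intro i _; simp [Fc]
  | succ f ih =>
    intro i h
    have h0 : fibA i ≤ m := h i (by omega) (by omega)
    have : ¬ (m < fibA i ∧ fibA i < n) := by omega
    simp only [Fc, this, if_false]
    rw [ih (i + 1) (fun j hj1 hj2 => h j (by omega) (by omega))]
    simp

lemma Fc_split (m n : Int) : ∀ p i q, Fc m n i (p + q) = Fc m n i p + Fc m n (i + p) q := by
  intro p
  induction p with
  | zero => intro i q; simp [Fc]
  | succ p ih =>
    intro i q
    have : p + 1 + q = (p + q) + 1 := by omega
    rw [this]
    simp only [Fc]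
    rw [ih (i + 1) q]
    have : i + 1 + p = i + (p + 1) := by omega
    rw [this]
    ring

lemma loopA2_count (m n : Int) : ∀ f i cnt, m < fibA i → n ≤ fibA (i + f) →
    loopA2 n f i cnt = cnt + Fc m n i f := by
  intro f
  induction f with
  | zero => intro i cnt _ _; simp [loopA2, Fc]
  | succ f ih =>
    intro i cnt hm hn
    simp only [loopA2]
    split
    · rename_i hlt
      have hm1 : m < fibA (i + 1) := lt_of_lt_of_le hm (fibA_step i)
      have hn1 : n ≤ fibA (i + 1 + f) := by
        have : i + 1 + f = i + (f + 1) := by omega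
        rw [this]; exact hn
      rw [ih (i + 1) (cnt + 1) hm1 hn1]
      simp only [Fc]
      have : (m < fibA i ∧ fibA i < n) := ⟨hm, by assumption⟩
      simp [this]; ring
    · rename_i hge
      have : Fc m n i (f + 1) = 0 := Fc_zero_of_ge m n (f + 1) i (by omega)
      rw [this]; ring

lemma loopB_count (m n : Int) : ∀ f i cnt, n ≤ fibA (i + f) →
    loopB m n f (fibA i) (fibA (i + 1)) cnt = cnt + Fc m n i f := by
  intro f
  induction f with
  | zero => intro i cnt _; simp [loopB, Fc]
  | succ f ih =>
    intro i cnt hn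
    simp only [loopB]
    split
    · rename_i hlt
      have hpair : fibA i + fibA (i + 1) = fibA (i + 1 + 1) := by
        simp only [fibA]; ring
      have hn1 : n ≤ fibA (i + 1 + f) := by
        have : i + 1 + f = i + (f + 1) := by omega
        rw [this]; exact hn
      rw [hpair, ih (i + 1) _ hn1]
      simp only [Fc]
      have ht : (m < fibA i ∧ fibA i < n) ↔ m < fibA i := by
        constructor
        · intro h; exact h.1
        · intro h; exact ⟨h, hlt⟩
      rw [if_congr ht rfl rfl]
      split <;> ring
    · rename_i hge
      have : Fc m n i (f + 1) = 0 := Fc_zero_of_ge m n (f + 1) i (by omega)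
      rw [this]; ring

-- ===== VERDICT (by name: the statement is the Claim_ definition above) =====
theorem count_fibonacci_spec : Claim_equal_count_fibonacci := by
  intro m n hdom
  unfold Spec_count_fibonacci count_fibonacci count_fibonacci_alt
  have hd : m ≤ 2147483648 ∧ n ≤ 2147483648 := by
    unfold Dom_count_fibonacci pvDomInt at hdom
    simp only [Bool.and_eq_true, decide_eq_true_eq] at hdom
    omega
  set i1 := loopA1 m 200 0 with hi1
  have hle : i1 ≤ 200 := by have := loopA1_le m 200 0; omega
  have hgt : m < fibA i1 := loopA1_gt m 200 0 (fibA_big hd.1 (by omega))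
  have hA : loopA2 n 200 i1 0 = 0 + Fc m n i1 200 :=
    loopA2_count m n 200 i1 0 hgt (le_of_lt (fibA_big hd.2 (by omega)))
  have hB : loopB m n 200 (fibA 0) (fibA (0 + 1)) 0 = 0 + Fc m n 0 200 :=
    loopB_count m n 200 0 0 (le_of_lt (fibA_big hd.2 (by omega)))
  have hB' : loopB m n 200 0 1 0 = 0 + Fc m n 0 200 := by
    simpa [fibA] using hB
  rw [hA, hB']
  -- Fc 0 200 = Fc 0 i1 + Fc i1 (200 - i1), with Fc 0 i1 = 0 (all those fibs ≤ m)
  have hsplit1 : Fc m n 0 200 = Fc m n 0 i1 + Fc m n i1 (200 - i1) := by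
    have h200 : i1 + (200 - i1) = 200 := by omega
    have := Fc_split m n i1 0 (200 - i1)
    rw [h200] at this
    simpa using this
  have hz1 : Fc m n 0 i1 = 0 :=
    Fc_zero_of_le m n i1 0 (fun j hj1 hj2 => loopA1_below m 200 0 j (by omega) (by omega))
  -- Fc i1 200 = Fc i1 (200 - i1) + Fc 200 i1, with Fc 200 i1 = 0 (those fibs ≥ n)
  have hsplit2 : Fc m n i1 200 = Fc m n i1 (200 - i1) + Fc m n 200 i1 := by
    have h200 : 200 - i1 + i1 = 200 := by omega
    have := Fc_split m n (200 - i1) i1 i1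
    rw [h200] at this
    have hidx : i1 + (200 - i1) = 200 := by omega
    rw [hidx] at this
    exact this
  have hz2 : Fc m n 200 i1 = 0 :=
    Fc_zero_of_ge m n i1 200 (le_of_lt (fibA_big hd.2 (by omega)))
  rw [hsplit1, hz1, hsplit2, hz2]
  ring
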